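-- pv_equiv track=rewrite | github.com/Anya-org/stacksorbit | enhanced_auto_detector.py | _sort_contracts_by_generic_dependencies
-- ===== SOURCE A (Python) =====
-- from typing import Dict, List, Optional, Tuple
--
-- def _sort_contracts_by_generic_dependencies(contracts: List[Dict]) -> List[Dict]:
--     """Sort contracts by generic dependency order (SDK 3.8 compatible)"""
--     # Generic dependency order for Stacks contracts
--     priority_order = [
--         # 1. Traits and interfaces (must come first)
--         'trait', 'traits', 'interface', 'interfaces',
--         'sip-009', 'sip-010', 'sip-013', 'sip-018',
--
--         # 2. Utilities and libraries
--         'utils', 'util', 'helper', 'library', 'lib',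
--         'math', 'string', 'encoding', 'crypto', 'hash',
--         'error', 'constants', 'types',
--
--         # 3. Core protocol contracts
--         'core', 'main', 'principal', 'registry', 'manager',
--
--         # 4. Token contracts
--         'token', 'ft', 'nft', 'fungible', 'non-fungible',
--         'mint', 'burn', 'transfer', 'balance', 'supply',
--
--         # 5. DeFi contracts
--         'dex', 'swap', 'pool', 'liquidity', 'amm', 'router', 'factory',
--         'pair', 'vault', 'staking', 'farming', 'yield', 'rewards',
--
--         # 6. Oracle contracts
--         'oracle', 'price', 'feed', 'aggregator', 'adapter',
--
--         # 7. Governance contracts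
--         'dao', 'governance', 'proposal', 'vote', 'voting',
--         'timelock', 'upgrade', 'admin', 'owner', 'controller',
--
--         # 8. Security and monitoring
--         'auth', 'access', 'control', 'circuit', 'breaker',
--         'pause', 'pausable', 'rate', 'limit', 'emergency',
--         'monitor', 'analytics', 'metrics', 'dashboard',
--
--         # 9. Testing and development
--         'test', 'mock', 'fake', 'simulator', 'debug'
--     ]
--
--     # Filter out None or invalid contracts
--     if not contracts:
--         return []
--     valid_contracts = [c for c in contracts if c and isinstance(c, dict) and c.get('name')]
--
--     if not valid_contracts:
--         return []
--
--     def get_priority(contract):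
--         name = contract.get('name', '')
--         if not name:
--             return len(priority_order)  # Low priority for contracts without names
--         name_lower = name.lower()
--         for i, priority in enumerate(priority_order):
--             if priority in name_lower:
--                 return i
--         return len(priority_order)  # Low priority for unknown contracts
--
--     return sorted(valid_contracts, key=get_priority)
-- ===== SOURCE B (Python) =====
-- from typing import Dict, List, Optional, Tuple
--
-- def _sort_contracts_by_generic_dependencies(contracts: List[Dict]) -> List[Dict]:
--     """Bucket contracts by priority class in one pass and concatenate the buckets."""
--     priority_order = [
--         'trait', 'traits', 'interface', 'interfaces',
--         'sip-009', 'sip-010', 'sip-013', 'sip-018',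
--         'utils', 'util', 'helper', 'library', 'lib',
--         'math', 'string', 'encoding', 'crypto', 'hash',
--         'error', 'constants', 'types',
--         'core', 'main', 'principal', 'registry', 'manager',
--         'token', 'ft', 'nft', 'fungible', 'non-fungible',
--         'mint', 'burn', 'transfer', 'balance', 'supply',
--         'dex', 'swap', 'pool', 'liquidity', 'amm', 'router', 'factory',
--         'pair', 'vault', 'staking', 'farming', 'yield', 'rewards',
--         'oracle', 'price', 'feed', 'aggregator', 'adapter',
--         'dao', 'governance', 'proposal', 'vote', 'voting',
--         'timelock', 'upgrade', 'admin', 'owner', 'controller',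
--         'auth', 'access', 'control', 'circuit', 'breaker',
--         'pause', 'pausable', 'rate', 'limit', 'emergency',
--         'monitor', 'analytics', 'metrics', 'dashboard',
--         'test', 'mock', 'fake', 'simulator', 'debug'
--     ]
--     K = len(priority_order)
--     buckets = [[] for _ in range(K + 1)]
--     for c in contracts:
--         name = c.get('name')
--         if not name:
--             continue
--         low = name.lower()
--         p = next((i for i, kw in enumerate(priority_order) if kw in low), K)
--         buckets[p].append(c)
--     return [c for bucket in buckets for c in bucket]
-- ===== Notes on version B (the rewrite author's own statement) =====
-- stated objective: alternative
-- what changed: Replaces the stable comparison sort (sorted with key=get_priority) and the separate validity filter by a single pass that drops unnamed contracts and appends each remaining contract into a per-priority bucket (computed via next/enumerate), returning the concatenation of the buckets in ascending priority order; early returns disappear because empty buckets flatten to [].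
import Mathlib
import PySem

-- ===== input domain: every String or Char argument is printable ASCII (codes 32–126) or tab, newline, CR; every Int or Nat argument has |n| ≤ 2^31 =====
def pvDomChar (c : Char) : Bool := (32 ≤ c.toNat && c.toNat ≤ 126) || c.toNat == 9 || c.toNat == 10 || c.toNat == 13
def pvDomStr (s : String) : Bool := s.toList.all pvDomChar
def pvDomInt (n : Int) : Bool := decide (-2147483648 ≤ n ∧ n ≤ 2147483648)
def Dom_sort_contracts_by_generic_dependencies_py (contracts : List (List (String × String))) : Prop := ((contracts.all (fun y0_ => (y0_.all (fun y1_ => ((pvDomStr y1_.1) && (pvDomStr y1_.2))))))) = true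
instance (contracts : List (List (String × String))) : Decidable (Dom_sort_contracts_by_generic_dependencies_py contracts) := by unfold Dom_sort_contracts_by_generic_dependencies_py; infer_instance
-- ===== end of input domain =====

-- B replaces the stable comparison sort of A by a one-pass bucket (counting) sort:
-- it appends each named contract into its priority-class bucket and concatenates the buckets.

-- module constant priority_order (83 entries; shared constant data, used by both programs)
def pvPriorityOrder : List String := [
  "trait", "traits", "interface", "interfaces",
  "sip-009", "sip-010", "sip-013", "sip-018",
  "utils", "util", "helper", "library", "lib",
  "math", "string", "encoding", "crypto", "hash",
  "error", "constants", "types",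
  "core", "main", "principal", "registry", "manager",
  "token", "ft", "nft", "fungible", "non-fungible",
  "mint", "burn", "transfer", "balance", "supply",
  "dex", "swap", "pool", "liquidity", "amm", "router", "factory",
  "pair", "vault", "staking", "farming", "yield", "rewards",
  "oracle", "price", "feed", "aggregator", "adapter",
  "dao", "governance", "proposal", "vote", "voting",
  "timelock", "upgrade", "admin", "owner", "controller",
  "auth", "access", "control", "circuit", "breaker",
  "pause", "pausable", "rate", "limit", "emergency",
  "monitor", "analytics", "metrics", "dashboard",
  "test", "mock", "fake", "simulator", "debug"]

-- ===== PORT A =====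

-- c.get('name'): first-match association-list lookup (exact for the dict convention)
def pvGetName (c : List (String × String)) : Option String :=
  match c with
  | [] => none
  | (k, v) :: rest => if k = "name" then some v else pvGetName rest

-- 'c and isinstance(c, dict) and c.get("name")': nonempty dict with a truthy name
def pvValid (c : List (String × String)) : Bool :=
  !c.isEmpty && (match pvGetName c with
                 | some s => !(s = "")
                 | none => false)

-- the enumerate loop of get_priority: first index whose keyword is a substring, else 83
def pvScan (s : String) (ps : List String) (i : Nat) : Nat :=
  match ps with
  | [] => 83
  | p :: rest => if PySem.Str.isIn p s then i else pvScan s rest (i + 1)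

-- get_priority (83 = len(priority_order))
def pvGetPriority (c : List (String × String)) : Nat :=
  if (pvGetName c).getD "" = "" then 83
  else pvScan (PySem.Str.lower ((pvGetName c).getD "")) pvPriorityOrder 0

def sort_contracts_by_generic_dependencies_py (contracts : List (List (String × String))) : List (List (String × String)) :=
  if contracts.isEmpty then []
  else
    let valid_contracts := contracts.filter pvValid
    if valid_contracts.isEmpty then []
    else PySem.List.sorted valid_contracts pvGetPriority false

-- ===== PORT B =====

-- Source B: name = c.get('name')  (first-match lookup via the library find?)
def pvNameOf (c : List (String × String)) : Option String :=
  (c.find? (fun kv => kv.1 == "name")).map Prod.snd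

-- Source B: p = next((i for i, kw in enumerate(priority_order) if kw in low), K)
def pvPrio (s : String) : Nat :=
  (pvPriorityOrder.findIdx? (fun kw => PySem.Str.isIn kw (PySem.Str.lower s))).getD 83

-- Source B: buckets[p].append(c)
def pvAdd {α : Type} (bs : List (List α)) (i : Nat) (x : α) : List (List α) :=
  match bs, i with
  | [], _ => []
  | b :: rest, 0 => (b ++ [x]) :: rest
  | b :: rest, n + 1 => b :: pvAdd rest n x

-- Source B: the for-loop filling the buckets
def pvFill (cs : List (List (String × String))) (bs : List (List (List (String × String)))) :
    List (List (List (String × String))) :=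
  match cs with
  | [] => bs
  | c :: rest =>
    match pvNameOf c with
    | none => pvFill rest bs
    | some s => if s = "" then pvFill rest bs
                else pvFill rest (pvAdd bs (pvPrio s) c)

def sort_contracts_by_generic_dependencies_py_alt (contracts : List (List (String × String))) : List (List (String × String)) :=
  (pvFill contracts (List.replicate 84 [])).flatten

-- ===== PRECONDITION & SPEC =====
def Spec_sort_contracts_by_generic_dependencies_py (contracts : List (List (String × String))) (out : List (List (String × String))) : Prop := out = sort_contracts_by_generic_dependencies_py_alt contracts
instance (contracts : List (List (String × String))) (out : List (List (String × String))) : Decidable (Spec_sort_contracts_by_generic_dependencies_py contracts out) := by unfold Spec_sort_contracts_by_generic_dependencies_py; infer_instance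

-- ===== CLAIM =====
def Claim_equal_sort_contracts_by_generic_dependencies_py : Prop := ∀ (contracts : List (List (String × String))), Dom_sort_contracts_by_generic_dependencies_py contracts → Spec_sort_contracts_by_generic_dependencies_py contracts (sort_contracts_by_generic_dependencies_py contracts)

-- ===== LEMMAS AND PROOFS =====

-- bucket form: concatenation of the key-classes 0..n-1 of xs, in order
def pvBuckets {α : Type} (key : α → Nat) (n : Nat) (xs : List α) : List α :=
  (List.range n).flatMap (fun i => xs.filter (fun c => decide (key c = i)))

theorem pv_mem_buckets_lt {α : Type} (key : α → Nat) (n : Nat) (xs : List α)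
    (y : α) (hy : y ∈ pvBuckets key n xs) : key y < n := by
  unfold pvBuckets at hy
  rcases List.mem_flatMap.1 hy with ⟨i, hi, hmem⟩
  have h1 := List.of_mem_filter hmem
  have h2 := List.mem_range.1 hi
  simp only [decide_eq_true_eq] at h1
  omega

theorem pv_insertBy_append_head_true {α : Type} (bef : α → α → Bool) (x : α)
    (l1 : List α) (h : α) (t : List α) (hh : bef x h = true) :
    PySem.List.insertBy bef x (l1 ++ h :: t) = PySem.List.insertBy bef x l1 ++ h :: t := by
  induction l1 with
  | nil => simp [PySem.List.insertBy, hh]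
  | cons a l ih =>
      simp only [List.cons_append, PySem.List.insertBy]
      split <;> simp [ih]

theorem pv_buckets_nonmem {α : Type} (key : α → Nat) (n : Nat) (xs : List α) (x : α)
    (hx : n ≤ key x) : pvBuckets key n (xs ++ [x]) = pvBuckets key n xs := by
  unfold pvBuckets
  simp only [List.flatMap]
  congr 1
  apply List.map_congr_left
  intro i hi
  have hin : i < n := List.mem_range.1 hi
  rw [List.filter_append]
  have : List.filter (fun c => decide (key c = i)) [x] = [] := by
    simp; omega
  simp [this]

theorem pv_insertBy_buckets {α : Type} (key : α → Nat) (n : Nat) (x : α) (xs : List α)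
    (hx : key x < n) :
    PySem.List.insertBy (fun a b => decide (key a < key b)) x (pvBuckets key n xs)
      = pvBuckets key n (xs ++ [x]) := by
  induction n with
  | zero => omega
  | succ n ih =>
      have hsplit : ∀ ys : List α, pvBuckets key (n + 1) ys
          = pvBuckets key n ys ++ ys.filter (fun c => decide (key c = n)) := by
        intro ys
        unfold pvBuckets
        rw [List.range_succ, List.flatMap_append]
        simp
      by_cases hk : key x = n
      · rw [hsplit xs, hsplit (xs ++ [x])]
        rw [PySem.List.insertBy_of_forall_not_before]
        · rw [pv_buckets_nonmem key n xs x (by omega)]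
          rw [List.filter_append]
          have : List.filter (fun c => decide (key c = n)) [x] = [x] := by simp [hk]
          rw [this, List.append_assoc]
        · intro y hy
          rcases List.mem_append.1 hy with h1 | h1
          · have := pv_mem_buckets_lt key n xs y h1
            simp; omega
          · have := List.of_mem_filter h1
            simp at this
            simp; omega
      · have hx' : key x < n := by omega
        rw [hsplit xs, hsplit (xs ++ [x])]
        have hfl : List.filter (fun c => decide (key c = n)) (xs ++ [x])
            = List.filter (fun c => decide (key c = n)) xs := by
          rw [List.filter_append]; simp [hk]
        rw [hfl]
        cases hcase : List.filter (fun c => decide (key c = n)) xs with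
        | nil => simp [ih hx']
        | cons h t =>
            have hh : decide (key x < key h) = true := by
              have hm := List.of_mem_filter (hcase ▸ List.mem_cons_self (l := t))
              simp only [decide_eq_true_eq] at hm ⊢
              omega
            rw [pv_insertBy_append_head_true _ x _ h t hh, ih hx']

theorem pv_sorted_eq_buckets {α : Type} (key : α → Nat) (n : Nat) (xs : List α)
    (h : ∀ x ∈ xs, key x < n) :
    PySem.List.sorted xs key false = pvBuckets key n xs := by
  induction xs using List.reverseRecOn with
  | nil => simp [PySem.List.sorted, pvBuckets]
  | append_singleton xs x ih =>
      rw [PySem.List.sorted_eq_foldl_insertBy, List.foldl_append]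
      rw [← PySem.List.sorted_eq_foldl_insertBy]
      simp only [List.foldl_cons, List.foldl_nil]
      rw [ih (fun y hy => h y (List.mem_append_left _ hy))]
      exact pv_insertBy_buckets key n x xs (h x (by simp))

-- the two name lookups agree
theorem pv_name_eq (c : List (String × String)) : pvNameOf c = pvGetName c := by
  induction c with
  | nil => rfl
  | cons kv rest ih =>
      obtain ⟨k, v⟩ := kv
      by_cases h : k = "name"
      · simp [pvNameOf, pvGetName, h]
      · have hb : (k == "name") = false := by simpa using h
        simp only [pvNameOf, pvGetName, List.find?_cons, hb, if_neg h]
        simpa [pvNameOf] using ih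

-- A's enumerate scan is B's findIdx? with default
theorem pv_scan_eq_findIdx (s : String) (ps : List String) (i : Nat) :
    pvScan s ps i = (match ps.findIdx? (fun p => PySem.Str.isIn p s) with
                     | some j => i + j
                     | none => 83) := by
  induction ps generalizing i with
  | nil => simp [pvScan, List.findIdx?_nil]
  | cons p rest ih =>
      by_cases h : PySem.Str.isIn p s
      · simp only [pvScan, List.findIdx?_cons, h, if_true]
        rfl
      · have hb : PySem.Str.isIn p s = false := by simpa using h
        simp only [pvScan, List.findIdx?_cons, hb, Bool.false_eq_true, if_false]
        rw [ih (i + 1)]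
        cases rest.findIdx? (fun p => PySem.Str.isIn p s) with
        | none => rfl
        | some j =>
            show i + 1 + j = i + (j + 1)
            omega

theorem pv_prio_eq (c : List (String × String)) (s : String)
    (hname : pvGetName c = some s) (hs : s ≠ "") : pvGetPriority c = pvPrio s := by
  unfold pvGetPriority pvPrio
  rw [hname]
  simp only [Option.getD_some, if_neg hs]
  rw [pv_scan_eq_findIdx]
  cases pvPriorityOrder.findIdx? (fun kw => PySem.Str.isIn kw (PySem.Str.lower s)) <;> simp

theorem pv_scan_le (s : String) (ps : List String) (i : Nat) :
    pvScan s ps i ≤ max 83 (i + ps.length) := by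
  induction ps generalizing i with
  | nil => simp [pvScan]
  | cons p rest ih =>
      simp only [pvScan]
      split
      · simp only [List.length_cons]; omega
      · have := ih (i + 1)
        simp only [List.length_cons]
        omega

theorem pv_priority_lt (c : List (String × String)) : pvGetPriority c < 84 := by
  unfold pvGetPriority
  split
  · omega
  · have := pv_scan_le (PySem.Str.lower ((pvGetName c).getD "")) pvPriorityOrder 0
    have hlen : pvPriorityOrder.length = 83 := rfl
    omega

theorem pv_prio_lt (s : String) : pvPrio s < 84 := by
  unfold pvPrio
  cases h : pvPriorityOrder.findIdx? (fun kw => PySem.Str.isIn kw (PySem.Str.lower s)) with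
  | none => simp
  | some j =>
      have := List.findIdx?_eq_some_iff_findIdx_eq.1 h
      have hlen : pvPriorityOrder.length = 83 := rfl
      simp
      omega

-- validity: B's inline test matches A's filter predicate
theorem pv_valid_iff (c : List (String × String)) :
    pvValid c = true ↔ ∃ s, pvGetName c = some s ∧ s ≠ "" := by
  unfold pvValid
  cases h : pvGetName c with
  | none => simp
  | some s =>
      have hne : c ≠ [] := by
        intro hc; subst hc; simp [pvGetName] at h
      constructor
      · intro hv
        simp [hne] at hv
        exact ⟨s, rfl, hv⟩
      · rintro ⟨t, ht, hts⟩
        injection ht with ht; subst ht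
        simp [hne, hts]

-- pvAdd: length preserved, buckets updated pointwise
theorem pv_length_pvAdd {α : Type} (bs : List (List α)) (i : Nat) (x : α) :
    (pvAdd bs i x).length = bs.length := by
  induction bs generalizing i with
  | nil => rfl
  | cons b rest ih =>
      cases i with
      | zero => rfl
      | succ n => simp [pvAdd, ih]

theorem pv_getD_pvAdd {α : Type} (bs : List (List α)) (i : Nat) (x : α) (j : Nat)
    (hi : i < bs.length) :
    (pvAdd bs i x)[j]?.getD [] = if j = i then bs[j]?.getD [] ++ [x] else bs[j]?.getD [] := by
  induction bs generalizing i j with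
  | nil => simp at hi
  | cons b rest ih =>
      cases i with
      | zero =>
          cases j with
          | zero => simp [pvAdd]
          | succ m => simp [pvAdd]
      | succ n =>
          cases j with
          | zero => simp [pvAdd]
          | succ m =>
              simp only [pvAdd, List.getElem?_cons_succ]
              rw [ih n m (by simpa using hi)]
              simp

theorem pv_length_pvFill (cs : List (List (String × String)))
    (bs : List (List (List (String × String)))) : (pvFill cs bs).length = bs.length := by
  induction cs generalizing bs with
  | nil => rfl
  | cons c rest ih =>
      unfold pvFill
      cases pvNameOf c with
      | none => exact ih bs
      | some s =>
          by_cases hs : s = ""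
          · simp [hs, ih]
          · show (if s = "" then pvFill rest bs
                  else pvFill rest (pvAdd bs (pvPrio s) c)).length = bs.length
            rw [if_neg hs, ih, pv_length_pvAdd]

-- loop invariant: bucket j collects, in order, the valid contracts of priority j
theorem pv_fill_getD (cs : List (List (String × String)))
    (bs : List (List (List (String × String)))) (hb : bs.length = 84) (j : Nat) :
    (pvFill cs bs)[j]?.getD []
      = bs[j]?.getD [] ++ (cs.filter pvValid).filter (fun c => decide (pvGetPriority c = j)) := by
  induction cs generalizing bs with
  | nil => simp [pvFill]
  | cons c rest ih =>
      unfold pvFill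
      cases hn : pvNameOf c with
      | none =>
          have hv : pvValid c = false := by
            rw [Bool.eq_false_iff]
            intro h
            rcases (pv_valid_iff c).1 h with ⟨s, hs, _⟩
            rw [pv_name_eq] at hn
            simp [hn] at hs
          simp only [List.filter_cons, hv]
          exact ih bs hb
      | some s =>
          by_cases hs : s = ""
          · subst hs
            have hv : pvValid c = false := by
              rw [Bool.eq_false_iff]
              intro h
              rcases (pv_valid_iff c).1 h with ⟨t, ht, hts⟩
              rw [pv_name_eq] at hn
              rw [hn] at ht
              injection ht with ht
              exact hts ht.symm
            simp only [List.filter_cons, hv]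
            exact ih bs hb
          · have hv : pvValid c = true := by
              refine (pv_valid_iff c).2 ⟨s, ?_, hs⟩
              rw [← pv_name_eq]; exact hn
            have hp : pvGetPriority c = pvPrio s := by
              refine pv_prio_eq c s ?_ hs
              rw [← pv_name_eq]; exact hn
            simp only [if_neg hs, List.filter_cons, hv]
            rw [ih (pvAdd bs (pvPrio s) c) (by rw [pv_length_pvAdd]; exact hb)]
            rw [pv_getD_pvAdd bs (pvPrio s) c j (by rw [hb]; exact pv_prio_lt s)]
            by_cases hj : pvGetPriority c = j
            · rw [hp] at hj
              simp [hj, hp, List.append_assoc]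
            · have : ¬ j = pvPrio s := by rw [← hp]; intro h; exact hj h.symm
              simp only [if_neg this]
              simp [hj]

-- flatten as an index-wise flatMap
theorem pv_flatten_eq_flatMap {α : Type} (bs : List (List α)) :
    bs.flatten = (List.range bs.length).flatMap (fun i => bs[i]?.getD []) := by
  induction bs with
  | nil => simp
  | cons b rest ih =>
      simp only [List.flatten_cons, List.length_cons, List.range_succ_eq_map,
        List.flatMap_cons, List.flatMap_map, List.getElem?_cons_zero, Option.getD_some,
        List.getElem?_cons_succ]
      rw [ih]

-- B's whole computation is the bucket concatenation of the valid contracts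
theorem pv_alt_eq_buckets (contracts : List (List (String × String))) :
    sort_contracts_by_generic_dependencies_py_alt contracts
      = pvBuckets pvGetPriority 84 (contracts.filter pvValid) := by
  unfold sort_contracts_by_generic_dependencies_py_alt pvBuckets
  rw [pv_flatten_eq_flatMap, pv_length_pvFill]
  simp only [List.length_replicate]
  congr 1
  funext i
  rw [pv_fill_getD contracts (List.replicate 84 []) (by simp) i]
  have hrep : (List.replicate 84 ([] : List (List (String × String))))[i]?.getD [] = [] := by
    rw [List.getElem?_replicate]; split <;> rfl
  rw [hrep, List.nil_append]

-- ===== VERDICT (by name: the statement is the Claim_ definition above) =====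
theorem sort_contracts_by_generic_dependencies_py_spec : Claim_equal_sort_contracts_by_generic_dependencies_py := by
  intro contracts _
  unfold Spec_sort_contracts_by_generic_dependencies_py
  rw [pv_alt_eq_buckets]
  unfold sort_contracts_by_generic_dependencies_py
  by_cases h0 : contracts.isEmpty
  · have : contracts = [] := List.isEmpty_iff.1 h0
    subst this
    simp [pvBuckets]
  · simp only [h0]
    by_cases h1 : (contracts.filter pvValid).isEmpty
    · have : contracts.filter pvValid = [] := List.isEmpty_iff.1 h1
      rw [this]
      simp [pvBuckets]
    · simp only [h1]
      exact pv_sorted_eq_buckets pvGetPriority 84 _ (fun x _ => pv_priority_lt x)
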